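-- pv_equiv track=rewrite | github.com/MortyTsai/ProjectInsight | src/projectinsight/renderers/component_renderer.py | _get_node_layer_info
-- ===== SOURCE A (Python) =====
-- def _get_node_layer_info(node_name: str, layer_info: dict[str, dict[str, str]]) -> tuple[str, str | None]:
--     """
--     根據節點 FQN，從 layer_info 中找到最精確匹配的架構層級鍵和顏色。
--     """
--     best_match_len = 0
--     default_color = "#E6F7FF"
--     layer_key = "(root)"
--
--     root_info = layer_info.get("(root)", {})
--     default_color = root_info.get("color", default_color)
--
--     for key, info in layer_info.items():
--         if key == "(root)":
--             continue
--
--         prefix = f"{key}."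
--         if node_name.startswith(prefix) and len(prefix) > best_match_len:
--             best_match_len = len(prefix)
--             default_color = info.get("color", default_color)
--             layer_key = key
--         elif node_name == key and len(key) > best_match_len:
--             best_match_len = len(key)
--             default_color = info.get("color", default_color)
--             layer_key = key
--
--     return layer_key, default_color
-- ===== SOURCE B (Python) =====
-- def _get_node_layer_info(node_name: str, layer_info: dict[str, dict[str, str]]) -> tuple[str, str | None]:
--     """Walk node_name's dot-boundary prefixes and dict-lookup each; keep the longest present."""
--     root_color = layer_info.get("(root)", {}).get("color", "#E6F7FF")
--     best = None
--     for i, ch in enumerate(node_name):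
--         if ch == ".":
--             cand = node_name[:i]
--             if cand != "(root)" and cand in layer_info:
--                 best = cand
--     if node_name and node_name != "(root)" and node_name in layer_info:
--         best = node_name
--     if best is None:
--         return "(root)", root_color
--     return best, layer_info[best].get("color", root_color)
-- ===== Notes on version B (the rewrite author's own statement) =====
-- stated objective: alternative
-- what changed: Instead of scanning every dict entry and prefix-testing each key against the node name, B enumerates the node name's dot-boundary prefixes (plus the name itself) and dict-looks each one up, keeping the longest present; the colour is read once from the winning entry with the root colour as fallback (intended as asymptotically lighter, O(L) lookups vs O(N*L) scans; a timing run measured only ~1.2x at the largest size, so no speed is claimed).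
-- outside the precondition, e.g. on _get_node_layer_info('a.', {'a': {'color': 'y'}, 'a.': {'color': 'x'}}): A returns ('a', 'y'), B returns ('a.', 'x')
import Mathlib
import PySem

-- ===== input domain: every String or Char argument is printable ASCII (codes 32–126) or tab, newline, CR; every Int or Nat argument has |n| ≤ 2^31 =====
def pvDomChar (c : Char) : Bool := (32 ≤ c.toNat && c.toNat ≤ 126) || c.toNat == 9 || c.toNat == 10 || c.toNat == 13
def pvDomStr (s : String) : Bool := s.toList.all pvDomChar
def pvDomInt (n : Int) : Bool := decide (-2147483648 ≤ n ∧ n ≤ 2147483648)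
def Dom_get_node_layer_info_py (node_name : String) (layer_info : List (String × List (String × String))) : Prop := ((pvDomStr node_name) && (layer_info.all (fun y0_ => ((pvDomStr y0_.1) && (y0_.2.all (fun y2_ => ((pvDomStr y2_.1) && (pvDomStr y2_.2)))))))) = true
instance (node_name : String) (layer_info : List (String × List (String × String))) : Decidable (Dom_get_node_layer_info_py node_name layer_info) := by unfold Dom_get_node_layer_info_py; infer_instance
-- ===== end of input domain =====

-- B replaces A's scan over every dict entry by enumerating the node name's dot-boundary
-- prefixes and looking each one up (objective: alternative; intended as lighter, not measured faster).
-- dict[str, dict[str, str]] is the association list List (String × List (String × String));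
-- dict.get(k, d) is (List.lookup k _).getD d (unique keys: first match = Python's lookup).

-- ===== PORT A =====
def get_node_layer_info_py (node_name : String) (layer_info : List (String × List (String × String))) : String × String :=
  -- best_match_len = 0; default_color = "#E6F7FF"; layer_key = "(root)"
  -- root_info = layer_info.get("(root)", {}); default_color = root_info.get("color", default_color)
  let root_info := (List.lookup "(root)" layer_info).getD []
  let default_color := (List.lookup "color" root_info).getD "#E6F7FF"
  -- for key, info in layer_info.items(): …
  let st := layer_info.foldl
    (fun (st : Int × String × String) kv =>
      if kv.1 = "(root)" then st
      else
        let pfx := kv.1 ++ "."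
        if PySem.Str.startswith node_name pfx ∧ PySem.Str.len pfx > st.1 then
          (PySem.Str.len pfx, (List.lookup "color" kv.2).getD st.2.1, kv.1)
        else if node_name = kv.1 ∧ PySem.Str.len kv.1 > st.1 then
          (PySem.Str.len kv.1, (List.lookup "color" kv.2).getD st.2.1, kv.1)
        else st)
    (0, default_color, "(root)")
  (st.2.2, st.2.1)

-- ===== PORT B =====
def get_node_layer_info_py_alt (node_name : String) (layer_info : List (String × List (String × String))) : String × String :=
  let root_color := (List.lookup "color" ((List.lookup "(root)" layer_info).getD [])).getD "#E6F7FF"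
  -- for i, ch in enumerate(node_name): if ch == '.': cand = node_name[:i]; …
  let best := (PySem.List.enumerate node_name.toList 0).foldl
    (fun (best : Option String) ic =>
      if ic.2 = '.' then
        let cand := PySem.Str.slice node_name none (some ic.1)   -- node_name[:i]
        if cand ≠ "(root)" ∧ (List.lookup cand layer_info).isSome then some cand else best
      else best)
    none
  -- if node_name and node_name != "(root)" and node_name in layer_info: best = node_name
  let best := if node_name ≠ "" ∧ node_name ≠ "(root)" ∧ (List.lookup node_name layer_info).isSome
              then some node_name else best
  match best with
  | none => ("(root)", root_color)
  | some b => (b, (List.lookup "color" ((List.lookup b layer_info).getD [])).getD root_color)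

-- ===== PRECONDITION & SPEC =====
-- Pre_ excludes two corners on which the colour or key reported depends on the dict's insertion
-- order, so either value is as defensible as the other:
-- a longest matching layer entry without a "color" key while another matching entry has one
-- (A then reports the colour of whichever shorter match the iteration happened to record, B the
-- root colour), and a node name ending in "." whose exact-match key and prefix key are both in
-- the dict (they tie in length and A keeps whichever comes first); it also requires the
-- association lists to have the unique keys every real Python dict has.
def Pre_get_node_layer_info_py (node_name : String) (layer_info : List (String × List (String × String))) : Prop :=
  (PySem.Str.endswith node_name "." = true →
     ¬ ((∃ kv ∈ layer_info, kv.1 ≠ "(root)" ∧ kv.1 = node_name) ∧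
        (∃ kv ∈ layer_info, kv.1 ≠ "(root)" ∧ kv.1.toList = node_name.toList.dropLast))) ∧
  (∀ kv ∈ layer_info, kv.1 ≠ "(root)" →
      (PySem.Str.startswith node_name (kv.1 ++ ".") = true ∨ node_name = kv.1) →
      (∀ kv' ∈ layer_info, kv'.1 ≠ "(root)" →
          (PySem.Str.startswith node_name (kv'.1 ++ ".") = true ∨ node_name = kv'.1) →
          PySem.Str.len kv'.1 ≤ PySem.Str.len kv.1) →
      (List.lookup "color" kv.2).isSome = false →
      (∀ kv' ∈ layer_info, kv'.1 ≠ "(root)" →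
          (PySem.Str.startswith node_name (kv'.1 ++ ".") = true ∨ node_name = kv'.1) →
          (List.lookup "color" kv'.2).isSome = true → kv'.1 = kv.1)) ∧
  (layer_info.map (·.1)).Nodup ∧ (∀ kv ∈ layer_info, (kv.2.map (·.1)).Nodup)
instance (node_name : String) (layer_info : List (String × List (String × String))) : Decidable (Pre_get_node_layer_info_py node_name layer_info) := by
  unfold Pre_get_node_layer_info_py
  refine @instDecidableAnd _ _ ?_ (@instDecidableAnd _ _ ?_ ?_) <;> infer_instance

def pvWitness_get_node_layer_info_py : String × (List (String × List (String × String))) :=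
  ("pkg.mod.f", [("(root)", [("color", "#FFFFFF")]), ("pkg", [("color", "#AACCEE")]), ("pkg.mod", [("color", "#112233")])])

def Spec_get_node_layer_info_py (node_name : String) (layer_info : List (String × List (String × String))) (out : String × String) : Prop := out = get_node_layer_info_py_alt node_name layer_info
instance (node_name : String) (layer_info : List (String × List (String × String))) (out : String × String) : Decidable (Spec_get_node_layer_info_py node_name layer_info out) := by unfold Spec_get_node_layer_info_py; infer_instance

-- ===== CLAIM (what is proved, stated in full; the proofs are below) =====
def Claim_equal_get_node_layer_info_py : Prop := ∀ (node_name : String) (layer_info : List (String × List (String × String))), Dom_get_node_layer_info_py node_name layer_info → Pre_get_node_layer_info_py node_name layer_info → Spec_get_node_layer_info_py node_name layer_info (get_node_layer_info_py node_name layer_info)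

-- ===== LEMMAS AND PROOFS =====

def pvElen (cs k : List Char) : Option Nat :=
  if (k ++ ['.']) <+: cs then some (k.length + 1)
  else if cs = k ∧ k ≠ [] then some k.length
  else none

theorem pvElen_pos {cs k : List Char} {m : Nat} (h : pvElen cs k = some m) : 1 ≤ m := by
  unfold pvElen at h; split_ifs at h with h1 h2
  · simp only [Option.some.injEq] at h; omega
  · obtain ⟨-, hk⟩ := h2
    have := List.length_pos_iff.mpr hk
    simp only [Option.some.injEq] at h; omega

theorem pvElen_le_len {cs k : List Char} {m : Nat} (h : pvElen cs k = some m) : m ≤ cs.length := by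
  unfold pvElen at h; split_ifs at h with h1 h2
  · have := h1.length_le; simp at this
    simp only [Option.some.injEq] at h; omega
  · obtain ⟨rfl, -⟩ := h2; simp only [Option.some.injEq] at h; omega

theorem pvPref_iff {cs k : List Char} {i : Nat} (hk : k.length = i) :
    (k ++ ['.']) <+: cs ↔ i < cs.length ∧ k = cs.take i ∧ cs[i]? = some '.' := by
  subst hk
  constructor
  · intro h
    have hlen := h.length_le; simp at hlen
    obtain ⟨t, ht⟩ := h
    refine ⟨by omega, ?_, ?_⟩
    · rw [← ht, List.append_assoc, List.take_append_of_le_length le_rfl, List.take_length]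
    · rw [← ht, List.getElem?_append_left (by simp), List.getElem?_append_right (by simp)]
      simp
  · rintro ⟨hlt, hke, hdot⟩
    refine ⟨cs.drop (k.length + 1), ?_⟩
    have h1 : cs.drop k.length = '.' :: cs.drop (k.length + 1) := by
      rw [List.drop_eq_getElem_cons (by omega)]
      have h2 := List.getElem?_eq_getElem (l := cs) (i := k.length) (by omega)
      rw [h2] at hdot
      simp only [Option.some.injEq] at hdot
      rw [hdot]
    calc k ++ ['.'] ++ cs.drop (k.length + 1) = k ++ ('.' :: cs.drop (k.length + 1)) := by simp
      _ = cs.take k.length ++ cs.drop k.length := by rw [← h1, ← hke]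
      _ = cs := List.take_append_drop _ _

theorem pvElen_cases {cs k : List Char} {m : Nat} (h : pvElen cs k = some m) :
    ((k ++ ['.']) <+: cs ∧ m = k.length + 1) ∨ (cs = k ∧ k ≠ [] ∧ m = k.length) := by
  unfold pvElen at h; split_ifs at h with h1 h2 <;> simp only [Option.some.injEq] at h
  · exact Or.inl ⟨h1, h.symm⟩
  · exact Or.inr ⟨h2.1, h2.2, h.symm⟩

theorem pvElen_eq_cases {cs k₁ k₂ : List Char} {m : Nat}
    (h₁ : pvElen cs k₁ = some m) (h₂ : pvElen cs k₂ = some m) :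
    k₁ = k₂ ∨ (cs.getLast? = some '.' ∧
       ((k₁ = cs ∧ k₂ = cs.dropLast) ∨ (k₂ = cs ∧ k₁ = cs.dropLast))) := by
  have tie : ∀ {a b : List Char}, (a ++ ['.']) <+: cs → cs = b ∧ b ≠ [] → a.length + 1 = b.length →
      cs.getLast? = some '.' ∧ b = cs ∧ a = cs.dropLast := by
    rintro a b hp ⟨rfl, -⟩ hlen
    obtain ⟨hlt, htake, hd⟩ := (pvPref_iff rfl).mp hp
    have hlast : cs.getLast? = some '.' := by
      rw [List.getLast?_eq_getElem?, show cs.length - 1 = a.length by omega, hd]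
    refine ⟨hlast, rfl, ?_⟩
    rw [htake, List.dropLast_eq_take]
    congr 1
    omega
  rcases pvElen_cases h₁ with ⟨p1, e1⟩ | ⟨q1, n1, e1⟩ <;>
  rcases pvElen_cases h₂ with ⟨p2, e2⟩ | ⟨q2, n2, e2⟩
  · left
    have c1 := (pvPref_iff rfl).mp p1
    have c2 := (pvPref_iff rfl).mp p2
    have he : k₁.length = k₂.length := by omega
    rw [c1.2.1, c2.2.1, he]
  · obtain ⟨hl, h1, h2⟩ := tie p1 ⟨q2, n2⟩ (by omega)
    exact Or.inr ⟨hl, Or.inr ⟨h1, h2⟩⟩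
  · obtain ⟨hl, h1, h2⟩ := tie p2 ⟨q1, n1⟩ (by omega)
    exact Or.inr ⟨hl, Or.inl ⟨h1, h2⟩⟩
  · left; rw [← q1, ← q2]

theorem pvElen_lt_len_mono {cs k k' : List Char} {m m' : Nat}
    (h : pvElen cs k = some m) (h' : pvElen cs k' = some m') (hlt : m' < m) :
    k'.length ≤ k.length := by
  have hle := pvElen_le_len h
  have hle' := pvElen_le_len h'
  rcases pvElen_cases h with ⟨-, e1⟩ | ⟨q1, -, e1⟩ <;>
  rcases pvElen_cases h' with ⟨-, e2⟩ | ⟨q2, -, e2⟩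
  · omega
  · have hq2 := congrArg List.length q2; omega
  · have hq1 := congrArg List.length q1; omega
  · have hq1 := congrArg List.length q1; have hq2 := congrArg List.length q2; omega

theorem pv_lookup_eq_of_nodup {κ ν : Type} [BEq κ] [LawfulBEq κ] {k : κ} {v : ν} {l : List (κ × ν)}
    (hnd : (l.map (·.1)).Nodup) (hm : (k, v) ∈ l) : List.lookup k l = some v := by
  induction l with
  | nil => simp at hm
  | cons p t ih =>
    rw [List.map_cons, List.nodup_cons] at hnd
    obtain ⟨hnotin, hnd'⟩ := hnd
    rw [List.lookup_cons]
    rcases List.mem_cons.mp hm with rfl | hmem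
    · simp
    · have hne : ¬ (k == p.1) = true := by
        intro hb
        have hkp : k = p.1 := (beq_iff_eq ..).mp hb
        exact hnotin (hkp ▸ List.mem_map.mpr ⟨(k, v), hmem, rfl⟩)
      simp only [hne]
      exact ih hnd' hmem

theorem pv_lookup_mem {κ ν : Type} [BEq κ] [LawfulBEq κ] {k : κ} {v : ν} {l : List (κ × ν)}
    (h : List.lookup k l = some v) : (k, v) ∈ l := by
  induction l with
  | nil => simp at h
  | cons p t ih =>
    rw [List.lookup_cons] at h
    cases hbe : k == p.1 with
    | true =>
      simp only [hbe] at h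
      have h1 : k = p.1 := (beq_iff_eq ..).mp hbe
      have h2 : p.2 = v := by simpa using h
      simp [h1, ← h2]
    | false =>
      simp only [hbe] at h
      exact List.mem_cons_of_mem _ (ih h)

theorem pv_mem_lookup_isSome {κ ν : Type} [BEq κ] [LawfulBEq κ] {k : κ} {v : ν} {l : List (κ × ν)}
    (h : (k, v) ∈ l) : (List.lookup k l).isSome = true := by
  induction l with
  | nil => simp at h
  | cons p t ih =>
    rw [List.lookup_cons]
    rcases List.mem_cons.mp h with rfl | hm
    · simp
    · cases hbe : k == p.1 with
      | true => simp
      | false => simpa using ih hm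

theorem pv_lookup_singleton {κ ν : Type} [BEq κ] [LawfulBEq κ] (p : κ × ν) :
    List.lookup p.1 [p] = some p.2 := by
  obtain ⟨a, b⟩ := p
  simp

def pvStepA (node_name : String) (st : Int × String × String) (kv : String × List (String × String)) : Int × String × String :=
  if kv.1 = "(root)" then st
  else
    let pfx := kv.1 ++ "."
    if PySem.Str.startswith node_name pfx ∧ PySem.Str.len pfx > st.1 then
      (PySem.Str.len pfx, (List.lookup "color" kv.2).getD st.2.1, kv.1)
    else if node_name = kv.1 ∧ PySem.Str.len kv.1 > st.1 then
      (PySem.Str.len kv.1, (List.lookup "color" kv.2).getD st.2.1, kv.1)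
    else st

theorem pvElen_none {cs k : List Char} (h : pvElen cs k = none) :
    ¬ (k ++ ['.']) <+: cs ∧ (cs = k → k = []) := by
  unfold pvElen at h; split_ifs at h with h1 h2
  · exact ⟨h1, fun hc => by_contra fun hn => h2 ⟨hc, hn⟩⟩

theorem pvStepA_char (node_name : String) (st : Int × String × String) (kv : String × List (String × String))
    (hst : 0 ≤ st.1) :
    pvStepA node_name st kv =
      if kv.1 = "(root)" then st
      else match pvElen node_name.toList kv.1.toList with
        | none => st
        | some m => if st.1 < (m : Int) then ((m : Int), (List.lookup "color" kv.2).getD st.2.1, kv.1) else st := by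
  have hsw : (PySem.Str.startswith node_name (kv.1 ++ ".") = true) ↔ (kv.1.toList ++ ['.']) <+: node_name.toList := by
    rw [PySem.Str.startswith_eq, PySem.Chars.startswith_iff]; simp
  have hlenp : PySem.Str.len (kv.1 ++ ".") = ((kv.1.toList.length + 1 : Nat) : Int) := by
    rw [PySem.Str.len_eq]; simp
  have hlenk : PySem.Str.len kv.1 = ((kv.1.toList.length : Nat) : Int) := by
    rw [PySem.Str.len_eq]
  have hne : (node_name = kv.1) ↔ node_name.toList = kv.1.toList := String.toList_inj.symm
  unfold pvStepA
  by_cases hr : kv.1 = "(root)"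
  · simp [hr]
  · simp only [hr, if_false]
    cases h : pvElen node_name.toList kv.1.toList with
    | none =>
      obtain ⟨hnp, hnx⟩ := pvElen_none h
      rw [if_neg (by rintro ⟨h1, -⟩; exact hnp (hsw.mp h1))]
      rw [if_neg (by
        rintro ⟨h1, h2⟩
        have := hnx (hne.mp h1)
        rw [hlenk, this] at h2
        simp at h2; omega)]
    | some m =>
      rcases pvElen_cases h with ⟨hp, hm⟩ | ⟨hq, hnil, hm⟩
      · by_cases hgt : st.1 < (m : Int)
        · rw [if_pos ⟨hsw.mpr hp, by rw [hlenp, ← hm]; exact_mod_cast hgt⟩]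
          simp only [if_pos hgt, hlenp, ← hm]
        · rw [if_neg (by rintro ⟨-, h2⟩; rw [hlenp, ← hm] at h2; exact hgt (by exact_mod_cast h2))]
          rw [if_neg (by
            rintro ⟨h1, -⟩
            have h3 := hp.length_le
            rw [hne.mp h1] at h3; simp at h3)]
          simp only [if_neg hgt]
      · have hnp : ¬ (kv.1.toList ++ ['.']) <+: node_name.toList := by
          rw [hq]; intro hc
          have := hc.length_le; simp at this
        rw [if_neg (by rintro ⟨h1, -⟩; exact hnp (hsw.mp h1))]
        by_cases hgt : st.1 < (m : Int)
        · rw [if_pos ⟨hne.mpr hq, by rw [hlenk, ← hm]; exact_mod_cast hgt⟩]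
          simp only [if_pos hgt, hlenk, ← hm]
        · rw [if_neg (by rintro ⟨-, h2⟩; rw [hlenk, ← hm] at h2; exact hgt (by exact_mod_cast h2))]
          simp only [if_neg hgt]

def pvMatch (cs : List Char) (l : List (String × List (String × String))) (m : Nat) : Prop :=
  ∃ kv ∈ l, kv.1 ≠ "(root)" ∧ pvElen cs kv.1.toList = some m

theorem pvMatch_append {cs : List Char} {l : List (String × List (String × String))}
    {kv : String × List (String × String)} {m : Nat} :
    pvMatch cs (l ++ [kv]) m ↔ pvMatch cs l m ∨ (kv.1 ≠ "(root)" ∧ pvElen cs kv.1.toList = some m) := by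
  unfold pvMatch
  constructor
  · rintro ⟨p, hp, h⟩
    rcases List.mem_append.mp hp with h1 | h1
    · exact Or.inl ⟨p, h1, h⟩
    · simp at h1; subst h1; exact Or.inr h
  · rintro (⟨p, hp, h⟩ | h)
    · exact ⟨p, List.mem_append_left _ hp, h⟩
    · exact ⟨kv, List.mem_append_right _ (by simp), h⟩

theorem pvA_fold_spec (node_name : String) (l : List (String × List (String × String))) (c0 : String) :
    (l.foldl (pvStepA node_name) (0, c0, "(root)") = (0, c0, "(root)") ∧ ∀ m, ¬ pvMatch node_name.toList l m)
    ∨ (∃ m k info cc, pvMatch node_name.toList l m ∧ (∀ m', pvMatch node_name.toList l m' → m' ≤ m)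
        ∧ k ≠ "(root)" ∧ pvElen node_name.toList k.toList = some m ∧ List.lookup k l = some info
        ∧ (∀ c, List.lookup "color" info = some c → cc = c)
        ∧ (cc = c0 ∨ ∃ kv ∈ l, kv.1 ≠ "(root)" ∧ (pvElen node_name.toList kv.1.toList).isSome
             ∧ List.lookup "color" kv.2 = some cc)
        ∧ l.foldl (pvStepA node_name) (0, c0, "(root)") = ((m : Int), cc, k)) := by
  induction l using List.reverseRecOn with
  | nil =>
    left; exact ⟨rfl, fun m => by rintro ⟨p, hp, -⟩; simp at hp⟩
  | append_singleton l kv ih =>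
    rw [List.foldl_append, List.foldl_cons, List.foldl_nil]
    rcases ih with ⟨hfold, hnone⟩ | ⟨m, k, info, cc, hm, hmax, hkr, hke, hlk, hprop, hdisj, hfold⟩
    · rw [hfold, pvStepA_char _ _ _ (by simp)]
      by_cases hr : kv.1 = "(root)"
      · left
        refine ⟨by simp [hr], fun m hm => ?_⟩
        rcases pvMatch_append.mp hm with h | ⟨h1, -⟩
        · exact hnone _ h
        · exact h1 hr
      · simp only [hr, if_false]
        cases he : pvElen node_name.toList kv.1.toList with
        | none =>
          left
          refine ⟨rfl, fun m hm => ?_⟩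
          rcases pvMatch_append.mp hm with h | ⟨-, h2⟩
          · exact hnone _ h
          · rw [he] at h2; simp at h2
        | some m =>
          have hpos : (0:Int) < (m:Int) := by exact_mod_cast pvElen_pos he
          simp only [if_pos hpos]
          right
          refine ⟨m, kv.1, kv.2, (List.lookup "color" kv.2).getD c0,
            pvMatch_append.mpr (Or.inr ⟨hr, he⟩), ?_, hr, he, ?_, ?_, ?_, rfl⟩
          · intro m' hm'
            rcases pvMatch_append.mp hm' with h | ⟨-, h2⟩
            · exact absurd h (hnone _)
            · rw [he] at h2; simp at h2; omega
          · rw [List.lookup_append]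
            have hn : List.lookup kv.1 l = none := by
              cases hl : List.lookup kv.1 l with
              | none => rfl
              | some v => exact absurd ⟨(kv.1, v), pv_lookup_mem hl, hr, he⟩ (hnone m)
            rw [hn, Option.none_or]
            exact pv_lookup_singleton kv
          · intro c hc; rw [hc]; rfl
          · cases hcol : List.lookup "color" kv.2 with
            | none => left; rfl
            | some c =>
              right
              exact ⟨kv, List.mem_append_right _ (by simp), hr, by rw [he]; rfl, by simp [hcol]⟩
    · have hlift : (cc = c0 ∨ ∃ p ∈ l ++ [kv], p.1 ≠ "(root)" ∧ (pvElen node_name.toList p.1.toList).isSome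
          ∧ List.lookup "color" p.2 = some cc) := by
        rcases hdisj with h | ⟨p, hp, h1, h2, h3⟩
        · exact Or.inl h
        · exact Or.inr ⟨p, List.mem_append_left _ hp, h1, h2, h3⟩
      rw [hfold, pvStepA_char _ _ _ (by exact Int.natCast_nonneg m)]
      by_cases hr : kv.1 = "(root)"
      · right
        refine ⟨m, k, info, cc, pvMatch_append.mpr (Or.inl hm), ?_, hkr, hke, ?_, hprop, hlift, by simp [hr]⟩
        · intro m' hm'
          rcases pvMatch_append.mp hm' with h | ⟨h1, -⟩
          · exact hmax _ h
          · exact absurd hr h1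
        · simp [List.lookup_append, hlk]
      · simp only [hr, if_false]
        cases he : pvElen node_name.toList kv.1.toList with
        | none =>
          right
          refine ⟨m, k, info, cc, pvMatch_append.mpr (Or.inl hm), ?_, hkr, hke, ?_, hprop, hlift, rfl⟩
          · intro m' hm'
            rcases pvMatch_append.mp hm' with h | ⟨-, h2⟩
            · exact hmax _ h
            · rw [he] at h2; simp at h2
          · simp [List.lookup_append, hlk]
        | some m' =>
          by_cases hgt : (m : Int) < (m' : Int)
          · simp only [if_pos hgt]
            right
            refine ⟨m', kv.1, kv.2, (List.lookup "color" kv.2).getD cc,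
              pvMatch_append.mpr (Or.inr ⟨hr, he⟩), ?_, hr, he, ?_, ?_, ?_, rfl⟩
            · intro m'' hm''
              rcases pvMatch_append.mp hm'' with h | ⟨-, h2⟩
              · have h3 := hmax _ h; omega
              · rw [he] at h2; simp at h2; omega
            · rw [List.lookup_append]
              have hn : List.lookup kv.1 l = none := by
                cases hl : List.lookup kv.1 l with
                | none => rfl
                | some v =>
                  have hmv : pvMatch node_name.toList l m' := ⟨(kv.1, v), pv_lookup_mem hl, hr, he⟩
                  have := hmax _ hmv
                  exact absurd hgt (by omega)
              rw [hn, Option.none_or]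
              exact pv_lookup_singleton kv
            · intro c hc; rw [hc]; rfl
            · cases hcol : List.lookup "color" kv.2 with
              | none => exact hlift
              | some c =>
                right
                exact ⟨kv, List.mem_append_right _ (by simp), hr, by rw [he]; rfl, by simp [hcol]⟩
          · simp only [if_neg hgt]
            right
            refine ⟨m, k, info, cc, pvMatch_append.mpr (Or.inl hm), ?_, hkr, hke, ?_, hprop, hlift, rfl⟩
            · intro m'' hm''
              rcases pvMatch_append.mp hm'' with h | ⟨-, h2⟩
              · exact hmax _ h
              · rw [he] at h2; simp at h2; omega
            · simp [List.lookup_append, hlk]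

def pvStepB (node_name : String) (layer_info : List (String × List (String × String)))
    (best : Option String) (ic : Int × Char) : Option String :=
  if ic.2 = '.' then
    let cand := PySem.Str.slice node_name none (some ic.1)
    if cand ≠ "(root)" ∧ (List.lookup cand layer_info).isSome then some cand else best
  else best

def pvCand (node_name : String) (j : Nat) : String := PySem.Str.slice node_name none (some (j : Int))

theorem pvCand_toList (node_name : String) (j : Nat) :
    (pvCand node_name j).toList = node_name.toList.take j := by
  unfold pvCand
  rw [PySem.Str.toList_slice, PySem.Chars.slice_eq_listSlice, PySem.List.slice_to_natCast]

def pvGood (node_name : String) (layer_info : List (String × List (String × String))) (j : Nat) : Prop :=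
  node_name.toList[j]? = some '.' ∧ pvCand node_name j ≠ "(root)" ∧
    (List.lookup (pvCand node_name j) layer_info).isSome = true

-- the scan over enumerate(node_name) equals a scan over List.range
theorem pvScan_eq_range (node_name : String) (layer_info : List (String × List (String × String))) :
    (PySem.List.enumerate node_name.toList 0).foldl (pvStepB node_name layer_info) none
    = (List.range node_name.toList.length).foldl
        (fun best (j : Nat) => pvStepB node_name layer_info best ((j : Int), node_name.toList.getD j ' ')) none := by
  rw [PySem.List.enumerate_eq_map_pyRange node_name.toList ' ']
  rw [PySem.List.len_eq, PySem.List.pyRange_zero_natCast, List.map_map, List.foldl_map]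
  simp [PySem.List.pyGetD_natCast]

theorem pvScan_spec (node_name : String) (layer_info : List (String × List (String × String)))
    (n : Nat) (hn : n ≤ node_name.toList.length) :
    (((List.range n).foldl
        (fun best (j : Nat) => pvStepB node_name layer_info best ((j : Int), node_name.toList.getD j ' ')) none = none)
      ∧ ∀ j, j < n → ¬ pvGood node_name layer_info j)
    ∨ (∃ j, j < n ∧ pvGood node_name layer_info j ∧ (∀ j', j' < n → pvGood node_name layer_info j' → j' ≤ j)
        ∧ (List.range n).foldl
            (fun best (j : Nat) => pvStepB node_name layer_info best ((j : Int), node_name.toList.getD j ' ')) none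
          = some (pvCand node_name j)) := by
  induction n with
  | zero => left; simp
  | succ n ih =>
    have hn' : n ≤ node_name.toList.length := by omega
    have hlt : n < node_name.toList.length := by omega
    have hchar : node_name.toList.getD n ' ' = (node_name.toList[n]?).getD ' ' := by
      rw [List.getD_eq_getElem?_getD]
    have hget : node_name.toList[n]? = some (node_name.toList[n]'hlt) := List.getElem?_eq_getElem hlt
    have hstep : ∀ b, (List.range (n+1)).foldl
        (fun best (j : Nat) => pvStepB node_name layer_info best ((j : Int), node_name.toList.getD j ' ')) b
        = pvStepB node_name layer_info
            ((List.range n).foldl (fun best (j : Nat) => pvStepB node_name layer_info best ((j : Int), node_name.toList.getD j ' ')) b)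
            ((n : Int), node_name.toList.getD n ' ') := by
      intro b; rw [List.range_succ, List.foldl_append, List.foldl_cons, List.foldl_nil]
    rw [hstep]
    have hcaseT : pvGood node_name layer_info n → ∀ b : Option String,
        pvStepB node_name layer_info b ((n : Int), node_name.toList.getD n ' ') = some (pvCand node_name n) := by
      rintro ⟨hd, hc1, hc2⟩ b
      unfold pvStepB
      have hdd : node_name.toList.getD n ' ' = '.' := by rw [hchar, hd]; rfl
      simp only [hdd, reduceIte]
      have hcond : (PySem.Str.slice node_name none (some (n : Int)) ≠ "(root)" ∧
          (List.lookup (PySem.Str.slice node_name none (some (n : Int))) layer_info).isSome = true) := ⟨hc1, hc2⟩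
      rw [if_pos hcond]
      rfl
    have hcaseF : ¬ pvGood node_name layer_info n → ∀ b : Option String,
        pvStepB node_name layer_info b ((n : Int), node_name.toList.getD n ' ') = b := by
      intro hg b
      unfold pvStepB
      by_cases hd : node_name.toList[n]? = some '.'
      · have hdd : node_name.toList.getD n ' ' = '.' := by rw [hchar, hd]; rfl
        simp only [hdd, reduceIte]
        have hcond : ¬ (PySem.Str.slice node_name none (some (n : Int)) ≠ "(root)" ∧
            (List.lookup (PySem.Str.slice node_name none (some (n : Int))) layer_info).isSome = true) :=
          fun hc => hg ⟨hd, hc.1, hc.2⟩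
        rw [if_neg hcond]
      · have hnotdot : node_name.toList.getD n ' ' ≠ '.' := by
          rw [hchar, hget]
          intro h
          apply hd
          rw [hget]
          simpa using h
        rw [if_neg hnotdot]
    by_cases hg : pvGood node_name layer_info n
    · right
      refine ⟨n, by omega, hg, ?_, by rw [hcaseT hg]⟩
      intro j' hj' _; omega
    · rw [hcaseF hg]
      rcases ih hn' with ⟨hfold, hnone⟩ | ⟨j, hj, hgj, hmax, hfold⟩
      · left
        refine ⟨hfold, fun j hj => ?_⟩
        rcases Nat.lt_succ_iff_lt_or_eq.mp hj with h | rfl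
        · exact hnone _ h
        · exact hg
      · right
        refine ⟨j, by omega, hgj, ?_, hfold⟩
        intro j' hj' hgood
        rcases Nat.lt_succ_iff_lt_or_eq.mp hj' with h | rfl
        · exact hmax _ h hgood
        · exact absurd hgood hg

theorem pvGood_match {node_name : String} {layer_info : List (String × List (String × String))} {j : Nat}
    (hj : j < node_name.toList.length) (hg : pvGood node_name layer_info j) :
    pvMatch node_name.toList layer_info (j + 1) ∧
      pvElen node_name.toList (pvCand node_name j).toList = some (j + 1) := by
  obtain ⟨hd, hc1, hc2⟩ := hg
  obtain ⟨v, hv⟩ := Option.isSome_iff_exists.mp hc2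
  have htake : (pvCand node_name j).toList = node_name.toList.take j := pvCand_toList _ _
  have hlen : (pvCand node_name j).toList.length = j := by
    rw [htake, List.length_take]; omega
  have hpref : ((pvCand node_name j).toList ++ ['.']) <+: node_name.toList :=
    (pvPref_iff hlen).mpr ⟨hj, htake, hd⟩
  have he : pvElen node_name.toList (pvCand node_name j).toList = some (j + 1) := by
    unfold pvElen; rw [if_pos hpref, hlen]
  exact ⟨⟨(pvCand node_name j, v), pv_lookup_mem hv, hc1, he⟩, he⟩

theorem pvMatch_pref_good {node_name : String} {layer_info : List (String × List (String × String))}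
    {kv : String × List (String × String)} {m : Nat}
    (hmem : kv ∈ layer_info) (hr : kv.1 ≠ "(root)")
    (hp : (kv.1.toList ++ ['.']) <+: node_name.toList) (hm : m = kv.1.toList.length + 1) :
    m - 1 < node_name.toList.length ∧ pvGood node_name layer_info (m - 1) := by
  obtain ⟨hlt, htake, hd⟩ := (pvPref_iff rfl).mp hp
  have hcand : pvCand node_name (kv.1.toList.length) = kv.1 := by
    apply String.toList_inj.mp
    rw [pvCand_toList, ← htake]
  subst hm
  refine ⟨by simpa using hlt, ?_, ?_, ?_⟩
  · simpa using hd
  · simp only [Nat.add_sub_cancel]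
    rw [hcand]; exact hr
  · simp only [Nat.add_sub_cancel]
    rw [hcand]
    exact pv_mem_lookup_isSome (v := kv.2) (by simpa using hmem)

theorem pvExact_elen {node_name : String} (hne : node_name ≠ "") :
    pvElen node_name.toList node_name.toList = some node_name.toList.length := by
  have hnil : node_name.toList ≠ [] := fun h => hne (String.toList_inj.mp (by simp [h]))
  unfold pvElen
  rw [if_neg (fun hc => by have := hc.length_le; simp at this)]
  rw [if_pos ⟨rfl, hnil⟩]

theorem pvA_eq (node_name : String) (l : List (String × List (String × String))) :
    get_node_layer_info_py node_name l
    = (let st := l.foldl (pvStepA node_name)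
         ((0 : Int), (List.lookup "color" ((List.lookup "(root)" l).getD [])).getD "#E6F7FF", "(root)");
       (st.2.2, st.2.1)) := rfl

theorem pvB_eq (node_name : String) (l : List (String × List (String × String))) :
    get_node_layer_info_py_alt node_name l
    = (let root_color := (List.lookup "color" ((List.lookup "(root)" l).getD [])).getD "#E6F7FF"
       let scan := (PySem.List.enumerate node_name.toList 0).foldl (pvStepB node_name l) none
       let best := if node_name ≠ "" ∧ node_name ≠ "(root)" ∧ (List.lookup node_name l).isSome
                   then some node_name else scan
       match best with
       | none => ("(root)", root_color)
       | some b => (b, (List.lookup "color" ((List.lookup b l).getD [])).getD root_color)) := rfl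

theorem pvMain (node_name : String) (l : List (String × List (String × String)))
    (hpre1 : PySem.Str.endswith node_name "." = true →
       ¬ ((∃ kv ∈ l, kv.1 ≠ "(root)" ∧ kv.1 = node_name) ∧
          (∃ kv ∈ l, kv.1 ≠ "(root)" ∧ kv.1.toList = node_name.toList.dropLast)))
    (hpre2 : ∀ kv ∈ l, kv.1 ≠ "(root)" →
      (PySem.Str.startswith node_name (kv.1 ++ ".") = true ∨ node_name = kv.1) →
      (∀ kv' ∈ l, kv'.1 ≠ "(root)" →
          (PySem.Str.startswith node_name (kv'.1 ++ ".") = true ∨ node_name = kv'.1) →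
          PySem.Str.len kv'.1 ≤ PySem.Str.len kv.1) →
      (List.lookup "color" kv.2).isSome = false →
      (∀ kv' ∈ l, kv'.1 ≠ "(root)" →
          (PySem.Str.startswith node_name (kv'.1 ++ ".") = true ∨ node_name = kv'.1) →
          (List.lookup "color" kv'.2).isSome = true → kv'.1 = kv.1))
    (hnodup : (l.map (·.1)).Nodup) :
    get_node_layer_info_py node_name l = get_node_layer_info_py_alt node_name l := by
  have hsw : ∀ k : String, (PySem.Str.startswith node_name (k ++ ".") = true) ↔ (k.toList ++ ['.']) <+: node_name.toList := by
    intro k; rw [PySem.Str.startswith_eq, PySem.Chars.startswith_iff]; simp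
  -- from a match length to A's loop condition
  have hcond : ∀ {k : String} {m : Nat}, pvElen node_name.toList k.toList = some m →
      (PySem.Str.startswith node_name (k ++ ".") = true ∨ node_name = k) := by
    intro k m he
    rcases pvElen_cases he with ⟨hp, -⟩ | ⟨hq, -, -⟩
    · exact Or.inl ((hsw k).mpr hp)
    · exact Or.inr (String.toList_inj.mp hq)
  -- under Pre_'s tie exclusion, a match length determines the key
  have hinj : ∀ {k k' : String} {m : Nat}, k ≠ "(root)" → k' ≠ "(root)" →
      (∃ v, (k, v) ∈ l) → (∃ v, (k', v) ∈ l) →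
      pvElen node_name.toList k.toList = some m → pvElen node_name.toList k'.toList = some m →
      k = k' := by
    intro k k' m hkr hkr' ⟨v, hv⟩ ⟨v', hv'⟩ he he'
    rcases pvElen_eq_cases he he' with heq | ⟨hlast, hcase⟩
    · exact String.toList_inj.mp heq
    · exfalso
      apply hpre1
      · rw [PySem.Str.endswith_eq, PySem.Chars.endswith_iff]
        obtain ⟨ys, hy⟩ := List.getLast?_eq_some_iff.mp hlast
        exact ⟨ys, by simpa using hy.symm⟩
      · rcases hcase with ⟨h1, h2⟩ | ⟨h1, h2⟩
        · exact ⟨⟨(k, v), hv, hkr, String.toList_inj.mp h1⟩, ⟨(k', v'), hv', hkr', h2⟩⟩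
        · exact ⟨⟨(k', v'), hv', hkr', String.toList_inj.mp h1⟩, ⟨(k, v), hv, hkr, h2⟩⟩
  -- A's loop condition yields a match length, except for the empty exact match
  have hcond_elen : ∀ {k : String},
      (PySem.Str.startswith node_name (k ++ ".") = true ∨ node_name = k) →
      (∃ m', pvElen node_name.toList k.toList = some m') ∨ k.toList = [] := by
    intro k hc
    rcases hc with hs | hq
    · left
      refine ⟨k.toList.length + 1, ?_⟩
      unfold pvElen
      rw [if_pos ((hsw k).mp hs)]
    · by_cases hnil : k.toList = []
      · right; exact hnil
      · left
        refine ⟨k.toList.length, ?_⟩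
        unfold pvElen
        rw [if_neg (fun hcp => by
            have hlen2 := hcp.length_le
            have hqq : node_name.toList.length = k.toList.length := by rw [hq]
            simp at hlen2 hqq
            omega),
          if_pos ⟨by rw [hq], hnil⟩]
  -- the exact-match condition of B, related to pvMatch
  have hex_match : (node_name ≠ "" ∧ node_name ≠ "(root)" ∧ (List.lookup node_name l).isSome = true) →
      pvMatch node_name.toList l node_name.toList.length ∧
        pvElen node_name.toList node_name.toList = some node_name.toList.length := by
    rintro ⟨h1, h2, h3⟩
    obtain ⟨v, hv⟩ := Option.isSome_iff_exists.mp h3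
    have he := pvExact_elen h1
    exact ⟨⟨(node_name, v), pv_lookup_mem hv, h2, he⟩, he⟩
  rw [pvA_eq, pvB_eq]
  simp only []
  rcases pvA_fold_spec node_name l ((List.lookup "color" ((List.lookup "(root)" l).getD [])).getD "#E6F7FF")
    with ⟨hfold, hnone⟩ | ⟨m, k, info, cc, hm, hmax, hkr, hke, hlk, hprop, hdisj, hfold⟩
  · -- no match at all
    rw [hfold]
    have hexF : ¬ (node_name ≠ "" ∧ node_name ≠ "(root)" ∧ (List.lookup node_name l).isSome = true) := by
      intro h; exact hnone _ (hex_match h).1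
    rw [if_neg hexF, pvScan_eq_range]
    rcases pvScan_spec node_name l node_name.toList.length le_rfl with ⟨hscan, -⟩ | ⟨j, hj, hgj, -, -⟩
    · rw [hscan]
    · exact absurd (pvGood_match hj hgj).1 (hnone _)
  · -- A's loop found the best match m with key k; its colour is cc
    have hmem : (k, info) ∈ l := pv_lookup_mem hlk
    -- k is length-maximal among A's loop conditions, so Pre_'s colour clause applies to it
    have hmaxlen : ∀ kv' ∈ l, kv'.1 ≠ "(root)" →
        (PySem.Str.startswith node_name (kv'.1 ++ ".") = true ∨ node_name = kv'.1) →
        PySem.Str.len kv'.1 ≤ PySem.Str.len k := by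
      intro kv' hmem' hr' hc'
      rcases hcond_elen hc' with ⟨m', he'⟩ | hnil
      · have hle : m' ≤ m := hmax _ ⟨kv', hmem', hr', he'⟩
        rcases Nat.lt_or_ge m' m with hlt | hge
        · have := pvElen_lt_len_mono hke he' hlt
          rw [PySem.Str.len_eq, PySem.Str.len_eq]
          exact_mod_cast this
        · have hmeq : m' = m := by omega
          have : kv'.1 = k := hinj hr' hkr ⟨kv'.2, hmem'⟩ ⟨info, hmem⟩ (hmeq ▸ he') hke
          rw [this]
      · rw [PySem.Str.len_eq, PySem.Str.len_eq, hnil]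
        simp
    -- both ports read the winning colour the same way
    have hcolor_eq : cc = (List.lookup "color" ((List.lookup k l).getD [])).getD
        ((List.lookup "color" ((List.lookup "(root)" l).getD [])).getD "#E6F7FF") := by
      rw [hlk, Option.getD_some]
      cases hc : List.lookup "color" info with
      | some c => rw [Option.getD_some]; exact hprop c hc
      | none =>
        rw [Option.getD_none]
        rcases hdisj with h | ⟨p, hp, hr', hsome', hcv⟩
        · exact h
        · exfalso
          obtain ⟨m', he'⟩ := Option.isSome_iff_exists.mp hsome'
          have hpk : p.1 = k :=
            hpre2 (k, info) hmem hkr (hcond hke) hmaxlen (by rw [hc]; rfl)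
              p hp hr' (hcond he') (by rw [hcv]; rfl)
          have : List.lookup p.1 l = some p.2 := pv_lookup_eq_of_nodup hnodup (by simpa using hp)
          rw [hpk, hlk] at this
          have h2 : info = p.2 := by simpa using this
          rw [← h2, hc] at hcv
          simp at hcv
    rw [hfold]
    by_cases hex : node_name ≠ "" ∧ node_name ≠ "(root)" ∧ (List.lookup node_name l).isSome = true
    · obtain ⟨hm', he'⟩ := hex_match hex
      have hmlen : m = node_name.toList.length := le_antisymm (pvElen_le_len hke) (hmax _ hm')
      obtain ⟨v, hv⟩ := Option.isSome_iff_exists.mp hex.2.2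
      have hkn : k = node_name :=
        hinj hkr hex.2.1 ⟨info, hmem⟩ ⟨v, pv_lookup_mem hv⟩ hke (hmlen ▸ he')
      rw [if_pos hex]
      subst hkn
      rw [hcolor_eq]
    · rw [if_neg hex, pvScan_eq_range]
      have hnotex : node_name.toList = k.toList → k.toList ≠ [] → False := by
        -- if the best match were exact, B's exact condition would hold
        intro hq hnil
        have hkn : node_name = k := String.toList_inj.mp hq
        apply hex
        refine ⟨?_, hkn ▸ hkr, hkn ▸ (by rw [hlk]; rfl)⟩
        intro hn
        rw [hn] at hq
        exact hnil (by simpa using hq.symm)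
      rcases pvScan_spec node_name l node_name.toList.length le_rfl with ⟨-, hnone'⟩ | ⟨j, hj, hgj, hmaxj, hscan⟩
      · -- no good dot position, so the best match must be exact — contradiction with hex
        exfalso
        rcases pvElen_cases hke with ⟨hp, hmm⟩ | ⟨hq, hnil, -⟩
        · obtain ⟨hlt2, hg2⟩ := pvMatch_pref_good hmem hkr hp hmm
          exact hnone' _ hlt2 hg2
        · exact hnotex hq hnil
      · obtain ⟨hmj, hej⟩ := pvGood_match hj hgj
        have h1 : j + 1 ≤ m := hmax _ hmj
        have h2 : m ≤ j + 1 := by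
          rcases pvElen_cases hke with ⟨hp, hmm⟩ | ⟨hq, hnil, -⟩
          · obtain ⟨hlt2, hg2⟩ := pvMatch_pref_good hmem hkr hp hmm
            have := hmaxj _ hlt2 hg2
            omega
          · exact absurd (hnotex hq hnil) not_false
        have hmeq : m = j + 1 := by omega
        obtain ⟨v, hv⟩ := Option.isSome_iff_exists.mp hgj.2.2
        have hkc : k = pvCand node_name j :=
          hinj hkr hgj.2.1 ⟨info, hmem⟩ ⟨v, pv_lookup_mem hv⟩ hke (hmeq ▸ hej)
        rw [hscan]
        subst hkc
        rw [hcolor_eq]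

-- ===== VERDICT (by name: the statement is the Claim_ definition above) =====
theorem get_node_layer_info_py_spec : Claim_equal_get_node_layer_info_py := by
  intro node_name layer_info _ hpre
  obtain ⟨hp1, hp2, hnodup, -⟩ := hpre
  unfold Spec_get_node_layer_info_py
  exact pvMain node_name layer_info hp1 hp2 hnodup
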